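-- pv_equiv track=rewrite | github.com/jessicamarvin/mypy | Investment Strategy Function.py | max_difference_loc
-- ===== SOURCE A (Python) =====
-- def max_difference_loc(L):
--     """max difference loc will accept a list and return the location of the values that
--        create the largest difference in which the larger value must come after the smaller one
--        output will be a string with the first argument being the location of the small
--        value and the second argument being the location of the larger value
--     """
--     maxdiff = abs(L[1] - L[0])
--     loc = []
--     for i in range(len(L)):
--         for j in range(i+1,len(L)):
--             if L[j] - L[i] >= maxdiff:
--                 if j > i:
--                     loc = [i,j]
--                     maxdiff = L[j] - L[i]
--     return loc
-- ===== SOURCE B (Python) =====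
-- def max_difference_loc(L):
--     """max difference loc will accept a list and return the location of the values that
--        create the largest difference in which the larger value must come after the smaller one"""
--     thresh = abs(L[1] - L[0])
--     pmin, imin = L[0], 0
--     best = None
--     for j in range(1, len(L)):
--         d = L[j] - pmin
--         if best is None or d >= best[0]:
--             best = (d, imin, j)
--         if L[j] <= pmin:
--             pmin, imin = L[j], j
--     return [best[1], best[2]] if best[0] >= thresh else []
-- ===== Notes on version B (the rewrite author's own statement) =====
-- stated objective: faster
-- what changed: A's O(n^2) all-pairs scan is replaced by one forward pass keeping the running prefix minimum (with the last index where it occurs) and the best (diff, i, j) candidate updated on >=, which reproduces A's last-pair-wins tie-breaking.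
-- outside the precondition, e.g. on max_difference_loc([1]): A raises IndexError, B raises IndexError; on max_difference_loc([]): A raises IndexError, B raises IndexError
import Mathlib
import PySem

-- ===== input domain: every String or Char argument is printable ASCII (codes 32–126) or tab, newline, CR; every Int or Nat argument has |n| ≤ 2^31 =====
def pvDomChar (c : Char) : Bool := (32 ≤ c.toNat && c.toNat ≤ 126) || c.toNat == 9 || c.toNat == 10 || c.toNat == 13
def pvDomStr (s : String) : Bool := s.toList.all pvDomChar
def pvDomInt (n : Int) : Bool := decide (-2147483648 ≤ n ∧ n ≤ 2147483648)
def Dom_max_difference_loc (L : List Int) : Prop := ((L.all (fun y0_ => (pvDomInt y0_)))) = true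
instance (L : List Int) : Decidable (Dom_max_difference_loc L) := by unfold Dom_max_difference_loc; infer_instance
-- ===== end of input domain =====

-- B replaces A's O(n^2) nested scan by one forward pass keeping the running prefix
-- minimum (with its last index) and the best (diff, i, j) candidate (objective: faster, O(n)).

-- ===== PORT A =====
def max_difference_loc (L : List Int) : List Int :=
  let maxdiff := |PySem.List.pyGetD L 1 0 - PySem.List.pyGetD L 0 0|
  let r := (PySem.List.pyRange 0 (PySem.List.len L) 1).foldl (fun s i =>
      (PySem.List.pyRange (i + 1) (PySem.List.len L) 1).foldl (fun s j =>
        if PySem.List.pyGetD L j 0 - PySem.List.pyGetD L i 0 ≥ s.2 then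
          (if j > i then ([i, j], PySem.List.pyGetD L j 0 - PySem.List.pyGetD L i 0) else s)
        else s) s) (([] : List Int), maxdiff)
  r.1

-- ===== PORT B =====
-- the body of Source B's single for-loop, over state (pmin, imin, best)
def pvBstep (L : List Int) (st : Int × Int × Option (Int × Int × Int)) (j : Int) :
    Int × Int × Option (Int × Int × Int) :=
  let d := PySem.List.pyGetD L j 0 - st.1
  let best' := match st.2.2 with
    | none => some (d, st.2.1, j)
    | some b => if d ≥ b.1 then some (d, st.2.1, j) else some b
  if PySem.List.pyGetD L j 0 ≤ st.1 then (PySem.List.pyGetD L j 0, j, best')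
  else (st.1, st.2.1, best')

def max_difference_loc_alt (L : List Int) : List Int :=
  let thresh := |PySem.List.pyGetD L 1 0 - PySem.List.pyGetD L 0 0|
  let st := (PySem.List.pyRange 1 (PySem.List.len L) 1).foldl (pvBstep L)
      (PySem.List.pyGetD L 0 0, 0, none)
  match st.2.2 with
  | some b => if b.1 ≥ thresh then [b.2.1, b.2.2] else []
  | none => []   -- unreachable under Pre_ (Python raises on lists shorter than 2)

-- ===== PRECONDITION & SPEC =====
-- Pre_ excludes lists of length < 2, on which the Python A raises IndexError at L[1] (B raises there too).
def Pre_max_difference_loc (L : List Int) : Prop := 2 ≤ L.length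
instance (L : List Int) : Decidable (Pre_max_difference_loc L) := by unfold Pre_max_difference_loc; infer_instance
def pvWitness_max_difference_loc : List Int := [3, 1, 4]

def Spec_max_difference_loc (L : List Int) (out : List Int) : Prop := out = max_difference_loc_alt L
instance (L : List Int) (out : List Int) : Decidable (Spec_max_difference_loc L out) := by unfold Spec_max_difference_loc; infer_instance

-- ===== CLAIM (what is proved, stated in full; the proofs are below) =====
def Claim_equal_max_difference_loc : Prop := ∀ (L : List Int), Dom_max_difference_loc L → Pre_max_difference_loc L → Spec_max_difference_loc L (max_difference_loc L)

-- ===== LEMMAS AND PROOFS =====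

-- the (difference, i, j) triples of all pairs i < j, in A's traversal order
def pvPairs (L : List Int) : List (Int × Int × Int) :=
  (PySem.List.pyRange 0 (PySem.List.len L) 1).flatMap (fun i =>
    (PySem.List.pyRange (i + 1) (PySem.List.len L) 1).map (fun j =>
      (PySem.List.pyGetD L j 0 - PySem.List.pyGetD L i 0, i, j)))

-- Python tuple comparison (d, i, j) > (d', i', j') : lexicographic, strict
def pvTupGt (t b : Int × Int × Int) : Bool :=
  decide (b.1 < t.1 ∨ (t.1 = b.1 ∧ (b.2.1 < t.2.1 ∨ (t.2.1 = b.2.1 ∧ b.2.2 < t.2.2))))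

-- non-strict lexicographic order on triples
def pvLexGe (a b : Int × Int × Int) : Prop :=
  b.1 < a.1 ∨ (a.1 = b.1 ∧ (b.2.1 < a.2.1 ∨ (a.2.1 = b.2.1 ∧ b.2.2 ≤ a.2.2)))

-- A's inner loop body, as a step over a (diff, i, j) triple
def pvStepA (s : List Int × Int) (p : Int × Int × Int) : List Int × Int :=
  if p.1 ≥ s.2 then (if p.2.2 > p.2.1 then ([p.2.1, p.2.2], p.1) else s) else s

-- running lexicographic maximum (keep-first on ties)
def pvStepB (b t : Int × Int × Int) : Int × Int × Int := if pvTupGt t b then t else b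

-- A's state, expressed from the running maximum m and the initial threshold t0
def pvReprA (t0 : Int) (m : Int × Int × Int) : List Int × Int :=
  ((if m.1 ≥ t0 then [m.2.1, m.2.2] else []), max t0 m.1)

-- strict lexicographic order on the (i, j) components only
def pvPosLt (a b : Int × Int × Int) : Prop :=
  a.2.1 < b.2.1 ∨ (a.2.1 = b.2.1 ∧ a.2.2 < b.2.2)

lemma pvLexGe_refl (a : Int × Int × Int) : pvLexGe a a := by unfold pvLexGe; omega

lemma pvLexGe_trans {a b c : Int × Int × Int} (h1 : pvLexGe a b) (h2 : pvLexGe b c) :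
    pvLexGe a c := by unfold pvLexGe at *; omega

lemma pvLexGe_antisymm {a b : Int × Int × Int} (h1 : pvLexGe a b) (h2 : pvLexGe b a) :
    a = b := by
  obtain ⟨a1, a2, a3⟩ := a; obtain ⟨b1, b2, b3⟩ := b
  unfold pvLexGe at h1 h2; dsimp only at h1 h2; simp only [Prod.mk.injEq]; omega

lemma pvTupGt_lexGe {t b : Int × Int × Int} (h : pvTupGt t b = true) : pvLexGe t b := by
  obtain ⟨t1, t2, t3⟩ := t; obtain ⟨b1, b2, b3⟩ := b
  unfold pvTupGt at h; unfold pvLexGe; simp only [decide_eq_true_eq] at h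
  dsimp only at h ⊢; omega

lemma pvTupGt_not_lexGe {t b : Int × Int × Int} (h : ¬ pvTupGt t b = true) : pvLexGe b t := by
  obtain ⟨t1, t2, t3⟩ := t; obtain ⟨b1, b2, b3⟩ := b
  unfold pvTupGt at h; unfold pvLexGe; simp only [decide_eq_true_eq, not_or, not_and, not_lt] at h
  dsimp only at h ⊢; omega

-- membership characterisation of pvPairs
lemma pvPairs_mem_iff {L : List Int} {p : Int × Int × Int} :
    p ∈ pvPairs L ↔ ∃ i j : Int, 0 ≤ i ∧ i < j ∧ j < (L.length : Int) ∧
      p = (PySem.List.pyGetD L j 0 - PySem.List.pyGetD L i 0, i, j) := by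
  simp only [pvPairs, List.mem_flatMap, List.mem_map, PySem.List.mem_pyRange_one,
    PySem.List.len_eq]
  constructor
  · rintro ⟨i, hi, j, hj, rfl⟩; exact ⟨i, j, hi.1, by omega, by omega, rfl⟩
  · rintro ⟨i, j, h1, h2, h3, rfl⟩; exact ⟨i, ⟨h1, by omega⟩, j, ⟨by omega, h3⟩, rfl⟩

lemma pvPairs_mem {L : List Int} {p : Int × Int × Int} (hp : p ∈ pvPairs L) :
    p.2.1 < p.2.2 := by
  obtain ⟨i, j, h1, h2, h3, rfl⟩ := pvPairs_mem_iff.1 hp; exact h2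

lemma pvPairs_pairwise (L : List Int) : (pvPairs L).Pairwise pvPosLt := by
  unfold pvPairs
  rw [List.pairwise_flatMap]
  constructor
  · intro a _
    rw [List.pairwise_map]
    exact (PySem.List.pairwise_lt_pyRange_one _ _).imp (fun h => Or.inr ⟨rfl, h⟩)
  · refine (PySem.List.pairwise_lt_pyRange_one _ _).imp ?_
    intro a b hab x hx y hy
    simp only [List.mem_map] at hx hy
    obtain ⟨j, _, rfl⟩ := hx
    obtain ⟨k, _, rfl⟩ := hy
    exact Or.inl hab

-- one step: A's update of its (loc, maxdiff) state mirrors the lex-max update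
lemma pvStep_eq (t0 : Int) (m p : Int × Int × Int) (hp : p.2.1 < p.2.2)
    (hmp : pvPosLt m p) : pvStepA (pvReprA t0 m) p = pvReprA t0 (pvStepB m p) := by
  obtain ⟨d, i, j⟩ := p
  obtain ⟨d', i', j'⟩ := m
  simp only [pvPosLt] at hmp
  simp only [pvStepA, pvStepB, pvReprA, pvTupGt]
  split_ifs <;>
    simp_all only [decide_eq_true_eq, Prod.mk.injEq, List.cons.injEq, and_true, true_and] <;>
    omega

-- the whole fold: A over the pair list equals the running lex max, rendered by pvReprA
lemma pvFold_AB (t0 : Int) (ps : List (Int × Int × Int)) : ∀ (m : Int × Int × Int),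
    (∀ p ∈ ps, p.2.1 < p.2.2) → (m :: ps).Pairwise pvPosLt →
    ps.foldl pvStepA (pvReprA t0 m) = pvReprA t0 (ps.foldl pvStepB m) := by
  induction ps with
  | nil => intro m _ _; rfl
  | cons p ps ih =>
    intro m hmem hpw
    have hmp : pvPosLt m p := (List.pairwise_cons.1 hpw).1 p (List.mem_cons_self ..)
    have hpj : p.2.1 < p.2.2 := hmem p (List.mem_cons_self ..)
    simp only [List.foldl_cons, pvStep_eq t0 m p hpj hmp]
    rcases List.pairwise_cons.1 hpw with ⟨-, hpw'⟩
    by_cases h : pvTupGt p m = true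
    · have : pvStepB m p = p := by simp [pvStepB, h]
      rw [this]
      exact ih p (fun q hq => hmem q (List.mem_cons_of_mem _ hq)) hpw'
    · have : pvStepB m p = m := by simp [pvStepB, h]
      rw [this]
      refine ih m (fun q hq => hmem q (List.mem_cons_of_mem _ hq)) ?_
      rw [List.pairwise_cons] at hpw ⊢
      exact ⟨fun q hq => hpw.1 q (List.mem_cons_of_mem _ hq), hpw'.sublist (List.sublist_cons_self ..)⟩

-- A's nested range loops are exactly the fold of pvStepA over the flattened pair list
lemma pvA_eq_fold (L : List Int) :
    max_difference_loc L =
      ((pvPairs L).foldl pvStepA (([] : List Int),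
        |PySem.List.pyGetD L 1 0 - PySem.List.pyGetD L 0 0|)).1 := by
  simp only [max_difference_loc, pvPairs, pvStepA, List.foldl_flatMap, List.foldl_map]

-- the running lex max is a member of the list and dominates it
lemma pvFoldB_spec (ps : List (Int × Int × Int)) : ∀ (p : Int × Int × Int),
    ps.foldl pvStepB p ∈ p :: ps ∧ ∀ q ∈ p :: ps, pvLexGe (ps.foldl pvStepB p) q := by
  induction ps with
  | nil =>
    intro p
    refine ⟨List.mem_cons_self .., ?_⟩
    intro q hq
    rw [List.mem_singleton] at hq
    exact hq ▸ pvLexGe_refl p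
  | cons t ts ih =>
    intro p
    simp only [List.foldl_cons]
    obtain ⟨ihmem, ihge⟩ := ih (pvStepB p t)
    have hge_p' : pvLexGe (ts.foldl pvStepB (pvStepB p t)) (pvStepB p t) :=
      ihge _ (List.mem_cons_self ..)
    have hp'p : pvLexGe (pvStepB p t) p := by
      unfold pvStepB; split_ifs with h
      · exact pvTupGt_lexGe h
      · exact pvLexGe_refl p
    have hp't : pvLexGe (pvStepB p t) t := by
      unfold pvStepB; split_ifs with h
      · exact pvLexGe_refl t
      · exact pvTupGt_not_lexGe h
    constructor
    · rcases List.mem_cons.1 ihmem with h | h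
      · rw [h]
        unfold pvStepB; split_ifs
        · exact List.mem_cons_of_mem _ (List.mem_cons_self ..)
        · exact List.mem_cons_self ..
      · exact List.mem_cons_of_mem _ (List.mem_cons_of_mem _ h)
    · intro q hq
      rcases List.mem_cons.1 hq with rfl | hq
      · exact pvLexGe_trans hge_p' hp'p
      rcases List.mem_cons.1 hq with rfl | hq
      · exact pvLexGe_trans hge_p' hp't
      · exact ihge q (List.mem_cons_of_mem _ hq)

-- A's result, characterised: render of a triple that is a pair and dominates all pairs
lemma pvA_char (L : List Int) (h : 2 ≤ L.length) :
    ∃ m : Int × Int × Int, m ∈ pvPairs L ∧ (∀ q ∈ pvPairs L, pvLexGe m q) ∧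
      max_difference_loc L =
        (if m.1 ≥ |PySem.List.pyGetD L 1 0 - PySem.List.pyGetD L 0 0| then [m.2.1, m.2.2] else []) := by
  have hne : pvPairs L ≠ [] := by
    intro hnil
    have : ((PySem.List.pyGetD L 1 0 - PySem.List.pyGetD L 0 0, 0, 1) : Int × Int × Int) ∈ pvPairs L :=
      pvPairs_mem_iff.2 ⟨0, 1, by omega, by omega, by exact_mod_cast by omega, rfl⟩
    rw [hnil] at this; exact absurd this (List.not_mem_nil)
  obtain ⟨p, ps, hps⟩ := List.exists_cons_of_ne_nil hne
  refine ⟨ps.foldl pvStepB p, ?_, ?_, ?_⟩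
  · rw [hps]; exact (pvFoldB_spec ps p).1
  · rw [hps]; exact (pvFoldB_spec ps p).2
  · rw [pvA_eq_fold, hps, List.foldl_cons]
    have hpj : p.2.1 < p.2.2 := pvPairs_mem (hps ▸ List.mem_cons_self ..)
    have hpw : (p :: ps).Pairwise pvPosLt := hps ▸ pvPairs_pairwise L
    have hmem : ∀ q ∈ ps, q.2.1 < q.2.2 := fun q hq =>
      pvPairs_mem (hps ▸ List.mem_cons_of_mem _ hq)
    set t0 := |PySem.List.pyGetD L 1 0 - PySem.List.pyGetD L 0 0| with ht0
    have hinit : pvStepA (([] : List Int), t0) p = pvReprA t0 p := by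
      obtain ⟨d, i, j⟩ := p
      simp only [pvStepA, pvReprA]
      split_ifs <;> simp_all only [Prod.mk.injEq, true_and] <;> simp [max_def] <;> omega
    rw [hinit, pvFold_AB t0 ps p hmem hpw]
    rfl

-- the invariant of B's single pass, after the indices 1 ≤ j < k have been processed
def pvInv (L : List Int) (k : Int) (st : Int × Int × Option (Int × Int × Int)) : Prop :=
  0 ≤ st.2.1 ∧ st.2.1 < k ∧ st.1 = PySem.List.pyGetD L st.2.1 0 ∧
  (∀ t : Int, 0 ≤ t → t < k → st.1 ≤ PySem.List.pyGetD L t 0) ∧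
  (∀ t : Int, st.2.1 < t → t < k → st.1 < PySem.List.pyGetD L t 0) ∧
  ((k = 1 ∧ st.2.2 = none) ∨ ∃ b : Int × Int × Int, st.2.2 = some b ∧ b.2.1 ≤ st.2.1 ∧
    (∃ i j : Int, 0 ≤ i ∧ i < j ∧ j < k ∧
      b = (PySem.List.pyGetD L j 0 - PySem.List.pyGetD L i 0, i, j)) ∧
    (∀ i j : Int, 0 ≤ i → i < j → j < k →
      pvLexGe b (PySem.List.pyGetD L j 0 - PySem.List.pyGetD L i 0, i, j)))

-- the new candidate (L[k]-pmin, imin, k) dominates every pair whose second index is k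
lemma pvCand_dom (L : List Int) (k pmin imin : Int)
    (h3 : pmin = PySem.List.pyGetD L imin 0)
    (h4 : ∀ t : Int, 0 ≤ t → t < k → pmin ≤ PySem.List.pyGetD L t 0)
    (h5 : ∀ t : Int, imin < t → t < k → pmin < PySem.List.pyGetD L t 0)
    (i : Int) (hi0 : 0 ≤ i) (hik : i < k) :
    pvLexGe (PySem.List.pyGetD L k 0 - pmin, imin, k)
      (PySem.List.pyGetD L k 0 - PySem.List.pyGetD L i 0, i, k) := by
  have hle := h4 i hi0 hik
  unfold pvLexGe
  dsimp only
  by_cases hlt : imin < i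
  · have := h5 i hlt hik; omega
  · omega

-- one step of B preserves the invariant
lemma pvInv_step (L : List Int) (k : Int) (hk : 1 ≤ k)
    (st : Int × Int × Option (Int × Int × Int)) (h : pvInv L k st) :
    pvInv L (k + 1) (pvBstep L st k) := by
  obtain ⟨pmin, imin, best⟩ := st
  obtain ⟨h1, h2, h3, h4, h5, h6⟩ := h
  dsimp only at h1 h2 h3 h4 h5 h6
  have hcand := pvCand_dom L k pmin imin h3 h4 h5
  set st' := pvBstep L (pmin, imin, best) k with hst'
  have e1 : st'.1 = if PySem.List.pyGetD L k 0 ≤ pmin then PySem.List.pyGetD L k 0 else pmin := by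
    rw [hst']; simp only [pvBstep]; split_ifs <;> rfl
  have e2 : st'.2.1 = if PySem.List.pyGetD L k 0 ≤ pmin then k else imin := by
    rw [hst']; simp only [pvBstep]; split_ifs <;> rfl
  -- in every case, the updated best c satisfies: c.2.1 ≤ imin, c is a pair with
  -- indices < k + 1, and c dominates all pairs with indices < k + 1
  obtain ⟨c, hc, hcle, hcex, hcdom⟩ :
      ∃ c : Int × Int × Int, st'.2.2 = some c ∧
        c.2.1 ≤ imin ∧
        (∃ i j : Int, 0 ≤ i ∧ i < j ∧ j < k + 1 ∧
          c = (PySem.List.pyGetD L j 0 - PySem.List.pyGetD L i 0, i, j)) ∧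
        (∀ i j : Int, 0 ≤ i → i < j → j < k + 1 →
          pvLexGe c (PySem.List.pyGetD L j 0 - PySem.List.pyGetD L i 0, i, j)) := by
    rcases h6 with ⟨hk1, rfl⟩ | ⟨b, rfl, hb1, ⟨i0, j0, hi0, hij0, hj0, hbeq⟩, hbdom⟩
    · -- best was none: k = 1, every pair has second index k
      refine ⟨(PySem.List.pyGetD L k 0 - pmin, imin, k),
        by rw [hst']; simp only [pvBstep]; split_ifs <;> rfl, le_refl _,
        ⟨imin, k, h1, h2, by omega, by rw [h3]⟩, ?_⟩
      intro i j hi hij hjk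
      have hjk' : j = k := by omega
      subst hjk'
      exact hcand i hi (by omega)
    · obtain ⟨b1, b2, b3⟩ := b
      dsimp only at hb1 hbdom ⊢
      by_cases hd : PySem.List.pyGetD L k 0 - pmin ≥ b1
      · -- the candidate replaces b and still dominates everything below k
        refine ⟨(PySem.List.pyGetD L k 0 - pmin, imin, k),
          by rw [hst']; simp only [pvBstep]; rw [if_pos hd]; split_ifs <;> rfl, le_refl _,
          ⟨imin, k, h1, h2, by omega, by rw [h3]⟩, ?_⟩
        intro i j hi hij hjk
        by_cases hjk' : j = k
        · subst hjk'; exact hcand i hi (by omega)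
        · have hq := hbdom i j hi hij (by omega)
          unfold pvLexGe at hq ⊢
          dsimp only at hq ⊢
          omega
      · -- b is kept; new pairs (second index k) have difference below b1
        refine ⟨(b1, b2, b3),
          by rw [hst']; simp only [pvBstep]; rw [if_neg hd]; split_ifs <;> rfl, hb1,
          ⟨i0, j0, hi0, hij0, by omega, hbeq⟩, ?_⟩
        intro i j hi hij hjk
        by_cases hjk' : j = k
        · subst hjk'
          have hle := h4 i hi (by omega)
          unfold pvLexGe
          dsimp only
          omega
        · exact hbdom i j hi hij (by omega)
  unfold pvInv
  rw [e1, e2, hc]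
  have hcle' : c.2.1 ≤ imin := hcle
  by_cases hmin : PySem.List.pyGetD L k 0 ≤ pmin
  · simp only [if_pos hmin]
    refine ⟨by omega, by omega, by trivial, ?_, ?_, Or.inr ⟨c, rfl, by omega, hcex, hcdom⟩⟩
    · intro t ht htk
      by_cases htk' : t = k
      · subst htk'; exact le_refl _
      · exact le_trans hmin (h4 t ht (by omega))
    · intro t ht htk; omega
  · simp only [if_neg hmin]
    rw [not_le] at hmin
    refine ⟨h1, by omega, h3, ?_, ?_, Or.inr ⟨c, rfl, hcle, hcex, hcdom⟩⟩
    · intro t ht htk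
      by_cases htk' : t = k
      · subst htk'; omega
      · exact h4 t ht (by omega)
    · intro t ht htk
      by_cases htk' : t = k
      · subst htk'; omega
      · exact h5 t ht (by omega)

-- the invariant holds after the whole loop up to 1 + m
lemma pvInv_fold (L : List Int) : ∀ (m : Nat),
    pvInv L (1 + (m : Int))
      ((PySem.List.pyRange 1 (1 + (m : Int)) 1).foldl (pvBstep L)
        (PySem.List.pyGetD L 0 0, 0, none)) := by
  intro m
  induction m with
  | zero =>
    rw [show ((0 : Nat) : Int) = 0 by rfl]
    rw [PySem.List.pyRange_one_eq_nil (by omega), List.foldl_nil]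
    unfold pvInv
    dsimp only
    refine ⟨by omega, by omega, rfl, ?_, by omega, Or.inl ⟨by omega, rfl⟩⟩
    intro t ht htk
    have : t = 0 := by omega
    subst this; exact le_refl _
  | succ m ih =>
    have hcast : ((m + 1 : Nat) : Int) = (m : Int) + 1 := by push_cast; ring
    rw [hcast, show (1 : Int) + ((m : Int) + 1) = (1 + (m : Int)) + 1 by ring,
      PySem.List.pyRange_one_succ_right (by omega), List.foldl_append, List.foldl_cons,
      List.foldl_nil]
    exact pvInv_step L (1 + (m : Int)) (by omega) _ ih

-- B's result, characterised the same way
lemma pvB_char (L : List Int) (h : 2 ≤ L.length) :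
    ∃ b : Int × Int × Int, b ∈ pvPairs L ∧ (∀ q ∈ pvPairs L, pvLexGe b q) ∧
      max_difference_loc_alt L =
        (if b.1 ≥ |PySem.List.pyGetD L 1 0 - PySem.List.pyGetD L 0 0| then [b.2.1, b.2.2] else []) := by
  have hlen : (1 : Int) + ((L.length - 1 : Nat) : Int) = (L.length : Int) := by
    push_cast [Nat.cast_sub (by omega : 1 ≤ L.length)]; ring
  have hinv := pvInv_fold L (L.length - 1)
  rw [hlen] at hinv
  obtain ⟨-, -, -, -, -, hbest⟩ := hinv
  rcases hbest with ⟨hk1, -⟩ | ⟨b, hsome, -, ⟨i, j, hi, hij, hjn, hbeq⟩, hdom⟩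
  · exfalso; omega
  · refine ⟨b, pvPairs_mem_iff.2 ⟨i, j, hi, hij, hjn, hbeq⟩, ?_, ?_⟩
    · intro q hq
      obtain ⟨i', j', h1, h2, h3, rfl⟩ := pvPairs_mem_iff.1 hq
      exact hdom i' j' h1 h2 h3
    · unfold max_difference_loc_alt
      simp only [PySem.List.len_eq, hsome]

theorem pv_main (L : List Int) (h : 2 ≤ L.length) :
    max_difference_loc L = max_difference_loc_alt L := by
  obtain ⟨m, hmmem, hmdom, hmeq⟩ := pvA_char L h
  obtain ⟨b, hbmem, hbdom, hbeq⟩ := pvB_char L h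
  have : m = b := pvLexGe_antisymm (hmdom b hbmem) (hbdom m hmmem)
  rw [hmeq, hbeq, this]

-- ===== VERDICT (by name: the statement is the Claim_ definition above) =====
theorem max_difference_loc_spec : Claim_equal_max_difference_loc := by
  intro L _ hpre
  unfold Spec_max_difference_loc
  exact pv_main L hpre
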